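-- pv_equiv track=rewrite | github.com/Ryanrenqian/AI_HW | homework1/AI_homework_1_刘仕怡_1901213132/AI_homework_1_-§--Ԩ_1901213132/ResNet18_CIFAR10/conv_visual.py | get_max_factor
-- ===== SOURCE A (Python) =====
-- import math
--
-- def get_max_factor(x):
--     factors = set()
--     for i in range(1, int(math.sqrt(x))+1):
--         if x % i == 0:
--             factors.add(int(i))
--             factors.add(int(x//i))
--     factors = sorted(factors)
--     num = len(factors)
--     if num % 2 == 0:
--         return factors[int(num/2)-1], factors[int(num/2)]
--     return factors[int(num//2)], factors[int(num//2)]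
-- ===== SOURCE B (Python) =====
-- import math
--
-- def get_max_factor(x):
--     # ascending divisors of x up to sqrt(x); the largest one is the lower
--     # member of the middle complementary pair
--     half = [i for i in range(1, int(math.sqrt(x)) + 1) if x % i == 0]
--     d = half[-1]
--     return d, x // d
-- ===== Notes on version B (the rewrite author's own statement) =====
-- stated objective: simpler
-- what changed: B keeps only the ascending divisors up to sqrt(x) and returns the last one with its complement, dropping A's full divisor set, the sort and the even/odd middle-index logic.
import Mathlib
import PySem

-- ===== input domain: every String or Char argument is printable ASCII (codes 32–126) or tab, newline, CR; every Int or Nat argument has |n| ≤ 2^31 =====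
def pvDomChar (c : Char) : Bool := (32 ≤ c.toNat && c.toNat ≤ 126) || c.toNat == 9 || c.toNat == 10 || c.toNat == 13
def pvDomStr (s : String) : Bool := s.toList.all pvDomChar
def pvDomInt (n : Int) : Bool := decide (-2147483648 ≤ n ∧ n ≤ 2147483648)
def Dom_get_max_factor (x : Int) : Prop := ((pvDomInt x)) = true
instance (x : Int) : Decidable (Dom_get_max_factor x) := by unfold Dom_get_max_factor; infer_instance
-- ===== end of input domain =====

-- B keeps only the ascending divisors ≤ √x and returns the last with its complement,
-- dropping A's full divisor set, the sort and the middle-index logic (simpler, same cost class).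


-- ===== PORT A =====
-- int(math.sqrt(x)) ported as Nat.sqrt: exact on Dom (0 ≤ x ≤ 2^31 < 2^52, double sqrt
-- is correctly rounded there, so int(math.sqrt(x)) = isqrt(x)); Pre_ restricts to x ≥ 1.
def get_max_factor (x : Int) : Int × Int :=
  let factors : PySem.Set Int :=
    (PySem.List.pyRange 1 ((Nat.sqrt x.toNat : Int) + 1) 1).foldl
      (fun fs i =>
        if PySem.Int.mod x i == 0 then
          PySem.Set.add (PySem.Set.add fs i) (PySem.Int.floordiv x i)
        else fs)
      PySem.Set.empty
  let sortedFactors := PySem.List.sorted factors (fun y => y) false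
  let num : Int := (sortedFactors.length : Int)
  if PySem.Int.mod num 2 == 0 then
    ((PySem.List.pyGet? sortedFactors (PySem.Int.floordiv num 2 - 1)).getD 0,
     (PySem.List.pyGet? sortedFactors (PySem.Int.floordiv num 2)).getD 0)
  else
    ((PySem.List.pyGet? sortedFactors (PySem.Int.floordiv num 2)).getD 0,
     (PySem.List.pyGet? sortedFactors (PySem.Int.floordiv num 2)).getD 0)

-- ===== PORT B =====
def get_max_factor_alt (x : Int) : Int × Int :=
  let half :=
    (PySem.List.pyRange 1 ((Nat.sqrt x.toNat : Int) + 1) 1).filter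
      (fun i => PySem.Int.mod x i == 0)
  let d := (PySem.List.pyGet? half (-1)).getD 0
  (d, PySem.Int.floordiv x d)

-- ===== PRECONDITION & SPEC =====
-- Pre_ admits exactly the positive arguments: elsewhere A raises (ValueError from math.sqrt
-- on negatives, IndexError indexing the empty divisor list otherwise), and B raises there too.
def Pre_get_max_factor (x : Int) : Prop := 1 ≤ x
instance (x : Int) : Decidable (Pre_get_max_factor x) := by unfold Pre_get_max_factor; infer_instance
def pvWitness_get_max_factor : Int := 12

def Spec_get_max_factor (x : Int) (out : Int × Int) : Prop := out = get_max_factor_alt x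
instance (x : Int) (out : Int × Int) : Decidable (Spec_get_max_factor x out) := by unfold Spec_get_max_factor; infer_instance

-- ===== CLAIM (what is proved, stated in full; the proofs are below) =====
def Claim_equal_get_max_factor : Prop := ∀ (x : Int), Dom_get_max_factor x → Pre_get_max_factor x → Spec_get_max_factor x (get_max_factor x)

-- ===== LEMMAS AND PROOFS =====

-- general fold lemma
theorem foldl_add2_spec (f : Int → Int) :
    ∀ (l : List Int) (s : PySem.Set Int), s.Nodup →
      (l.foldl (fun fs i => PySem.Set.add (PySem.Set.add fs i) (f i)) s).Nodup ∧
      (∀ a, a ∈ l.foldl (fun fs i => PySem.Set.add (PySem.Set.add fs i) (f i)) s ↔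
        a ∈ s ∨ ∃ i ∈ l, a = i ∨ a = f i) := by
  intro l
  induction l with
  | nil => intro s hs; simpa using hs
  | cons y t ih =>
    intro s hs
    have h1 : (PySem.Set.add (PySem.Set.add s y) (f y)).Nodup :=
      PySem.Set.nodup_add _ _ (PySem.Set.nodup_add _ _ hs)
    obtain ⟨hn, hm⟩ := ih _ h1
    refine ⟨hn, fun a => ?_⟩
    rw [List.foldl_cons] at *
    rw [hm a]
    simp [PySem.Set.mem_add]
    constructor
    · rintro (((h|h)|h)|h)
      · tauto
      · tauto
      · tauto
      · exact Or.inr (Or.inr h)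
    · rintro (h|(h|h)|h)
      · tauto
      · tauto
      · tauto
      · exact Or.inr h

def pvSqrt (x : Int) : Int := (Nat.sqrt x.toNat : Int)
def pvHalf (x : Int) : List Int :=
  (PySem.List.pyRange 1 (pvSqrt x + 1) 1).filter (fun i => PySem.Int.mod x i == 0)
def pvComp (x : Int) : List Int :=
  ((pvHalf x).filter (fun i => !(x / i == i))).map (fun i => x / i)
def pvFull (x : Int) : List Int := pvHalf x ++ (pvComp x).reverse

theorem pv_mem_half {x i : Int} : i ∈ pvHalf x ↔ (1 ≤ i ∧ i ≤ pvSqrt x) ∧ i ∣ x := by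
  simp [pvHalf, List.mem_filter, PySem.List.mem_pyRange_one,
        PySem.Int.mod_eq_zero_iff_dvd]

theorem pv_sq_le {x : Int} (hx : 1 ≤ x) :
    pvSqrt x * pvSqrt x ≤ x ∧ x < (pvSqrt x + 1) * (pvSqrt x + 1) := by
  have h1 := Nat.sqrt_le' x.toNat
  have h2 := Nat.lt_succ_sqrt' x.toNat
  have hx0 : x.toNat = x := Int.toNat_of_nonneg (by omega)
  unfold pvSqrt
  constructor
  · calc ((Nat.sqrt x.toNat : Int)) * (Nat.sqrt x.toNat : Int)
        = ((Nat.sqrt x.toNat * Nat.sqrt x.toNat : Nat) : Int) := by push_cast; ring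
      _ ≤ (x.toNat : Int) := by exact_mod_cast (by simpa [pow_two] using h1 : x.toNat.sqrt * x.toNat.sqrt ≤ x.toNat)
      _ = x := hx0
  · calc x = (x.toNat : Int) := hx0.symm
      _ < ((Nat.sqrt x.toNat).succ * (Nat.sqrt x.toNat).succ : Nat) := by exact_mod_cast (by simpa [pow_two] using h2 : x.toNat < x.toNat.sqrt.succ * x.toNat.sqrt.succ)
      _ = ((Nat.sqrt x.toNat : Int) + 1) * ((Nat.sqrt x.toNat : Int) + 1) := by push_cast; ring

theorem pv_one_le_sqrt {x : Int} (hx : 1 ≤ x) : 1 ≤ pvSqrt x := by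
  unfold pvSqrt
  have : 1 ≤ x.toNat := by omega
  have := Nat.sqrt_pos.mpr this
  omega

theorem pv_half_pairwise (x : Int) : (pvHalf x).Pairwise (· < ·) :=
  (PySem.List.pairwise_lt_pyRange_one _ _).filter _

theorem pv_div_mul {x i : Int} (hi : i ∈ pvHalf x) : (x / i) * i = x :=
  Int.ediv_mul_cancel (pv_mem_half.mp hi).2

theorem pv_key3 {x i : Int} (hx : 1 ≤ x) (hi : i ∈ pvHalf x) (heq : x / i = i) :
    i = pvSqrt x ∧ x = pvSqrt x * pvSqrt x := by
  obtain ⟨⟨h1, h2⟩, hdvd⟩ := pv_mem_half.mp hi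
  have hxii : x = i * i := by rw [← pv_div_mul hi, heq]
  have hcast : ((i.toNat * i.toNat : Nat) : Int) = x := by
    push_cast [Int.toNat_of_nonneg (show (0:Int) ≤ i by omega)]
    exact hxii.symm
  have hnat : x.toNat = i.toNat * i.toNat := by omega
  have : Nat.sqrt x.toNat = i.toNat := by
    rw [hnat]
    simpa [pow_two] using Nat.sqrt_eq' i.toNat
  have : pvSqrt x = i := by unfold pvSqrt; omega
  constructor
  · omega
  · rw [this, ← hxii]

theorem pv_key1 {x i : Int} (hx : 1 ≤ x) (hi : i ∈ pvHalf x) (hne : x / i ≠ i) :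
    pvSqrt x < x / i := by
  obtain ⟨⟨h1, h2⟩, hdvd⟩ := pv_mem_half.mp hi
  have hmul := pv_div_mul hi
  have hs := pv_sq_le hx
  by_contra hle
  push_neg at hle
  -- x / i ≤ s, i ≤ s, (x/i)*i = x, s*s ≤ x ⇒ x = s*s and x/i = s = i
  have hq1 : 1 ≤ x / i := by nlinarith
  have hxle : x ≤ pvSqrt x * pvSqrt x := by nlinarith
  have hxeq : x = pvSqrt x * pvSqrt x := le_antisymm hxle hs.1
  have : x / i = pvSqrt x := by nlinarith
  have : i = pvSqrt x := by nlinarith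
  apply hne; omega

theorem pv_key2 {x i j : Int} (hx : 1 ≤ x) (hi : i ∈ pvHalf x) (hj : j ∈ pvHalf x)
    (hij : i < j) : x / j < x / i := by
  obtain ⟨⟨hi1, _⟩, _⟩ := pv_mem_half.mp hi
  obtain ⟨⟨hj1, _⟩, _⟩ := pv_mem_half.mp hj
  have h1 := pv_div_mul hi
  have h2 := pv_div_mul hj
  have hq : 1 ≤ x / j := by nlinarith
  by_contra hle
  push_neg at hle
  nlinarith

theorem pv_mem_comp {x b : Int} (hx : 1 ≤ x) :
    b ∈ pvComp x ↔ ∃ i ∈ pvHalf x, x / i ≠ i ∧ b = x / i := by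
  simp only [pvComp, List.mem_map, List.mem_filter]
  constructor
  · rintro ⟨i, ⟨hi, hq⟩, rfl⟩
    exact ⟨i, hi, by simpa using hq, rfl⟩
  · rintro ⟨i, hi, hq, rfl⟩
    exact ⟨i, ⟨hi, by simpa using hq⟩, rfl⟩

theorem pv_full_pairwise {x : Int} (hx : 1 ≤ x) : (pvFull x).Pairwise (· < ·) := by
  unfold pvFull
  rw [List.pairwise_append]
  refine ⟨pv_half_pairwise x, ?_, ?_⟩
  · rw [List.pairwise_reverse]
    unfold pvComp
    rw [List.pairwise_map]
    have h := (List.Pairwise.and_mem.mp ((pv_half_pairwise x).filter (fun i => !(x / i == i))))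
    refine h.imp ?_
    rintro i j ⟨hi, hj, hij⟩
    have hi' : i ∈ pvHalf x := List.mem_of_mem_filter hi
    have hj' : j ∈ pvHalf x := List.mem_of_mem_filter hj
    exact pv_key2 hx hi' hj' hij
  · intro a ha b hb
    rw [List.mem_reverse] at hb
    obtain ⟨i, hi, hne, rfl⟩ := (pv_mem_comp hx).mp hb
    have h1 := pv_key1 hx hi hne
    have h2 := (pv_mem_half.mp ha).1.2
    omega

theorem pv_full_nodup {x : Int} (hx : 1 ≤ x) : (pvFull x).Nodup :=
  (pv_full_pairwise hx).imp (fun h => ne_of_lt h)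

theorem pv_mem_full {x a : Int} (hx : 1 ≤ x) :
    a ∈ pvFull x ↔ ∃ i ∈ pvHalf x, a = i ∨ a = x / i := by
  unfold pvFull
  rw [List.mem_append, List.mem_reverse, pv_mem_comp hx]
  constructor
  · rintro (ha | ⟨i, hi, hne, rfl⟩)
    · exact ⟨a, ha, Or.inl rfl⟩
    · exact ⟨i, hi, Or.inr rfl⟩
  · rintro ⟨i, hi, rfl | rfl⟩
    · exact Or.inl hi
    · by_cases hq : x / i = i
      · rw [hq]; exact Or.inl hi
      · exact Or.inr ⟨i, hi, hq, rfl⟩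

def pvF (x : Int) : PySem.Set Int :=
  (PySem.List.pyRange 1 (pvSqrt x + 1) 1).foldl
    (fun fs i =>
      if PySem.Int.mod x i == 0 then
        PySem.Set.add (PySem.Set.add fs i) (PySem.Int.floordiv x i)
      else fs)
    PySem.Set.empty

theorem pv_F_eq_foldl_half (x : Int) :
    pvF x = (pvHalf x).foldl
      (fun fs i => PySem.Set.add (PySem.Set.add fs i) (PySem.Int.floordiv x i))
      PySem.Set.empty := by
  unfold pvF pvHalf
  exact PySem.List.foldl_if_eq_foldl_filter _ _ _ _

theorem pv_F_nodup (x : Int) : (pvF x).Nodup := by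
  rw [pv_F_eq_foldl_half]
  exact (foldl_add2_spec (fun i => PySem.Int.floordiv x i) (pvHalf x) PySem.Set.empty (by simp [PySem.Set.empty])).1

theorem pv_mem_F {x a : Int} (hx : 1 ≤ x) : a ∈ pvF x ↔ ∃ i ∈ pvHalf x, a = i ∨ a = x / i := by
  rw [pv_F_eq_foldl_half]
  rw [(foldl_add2_spec (fun i => PySem.Int.floordiv x i) (pvHalf x) PySem.Set.empty (by simp [PySem.Set.empty])).2 a]
  simp only [PySem.Set.empty, List.not_mem_nil, false_or]
  constructor <;> rintro ⟨i, hi, h⟩ <;>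
    refine ⟨i, hi, ?_⟩ <;>
    rw [PySem.Int.floordiv_eq_ediv_of_pos (by have := (pv_mem_half.mp hi).1.1; omega)] at * <;>
    exact h

theorem pv_sorted_eq {x : Int} (hx : 1 ≤ x) :
    PySem.List.sorted (pvF x) (fun y => y) false = pvFull x := by
  apply PySem.List.sorted_eq_of_perm_of_pairwise_lt
  · rw [List.perm_ext_iff_of_nodup (pv_full_nodup hx) (pv_F_nodup x)]
    intro a
    rw [pv_mem_full hx, pv_mem_F hx]
  · exact pv_full_pairwise hx

theorem pv_getLast_le {l : List Int} (hp : l.Pairwise (· < ·)) (hne : l ≠ []) :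
    ∀ a ∈ l, a ≤ l.getLast hne := by
  intro a ha
  obtain ⟨k, hk, rfl⟩ := List.mem_iff_getElem.mp ha
  rw [List.getLast_eq_getElem hne]
  rcases Nat.lt_or_ge k (l.length - 1) with h | h
  · exact le_of_lt ((List.pairwise_iff_getElem.mp hp) k (l.length - 1) hk (by omega) h)
  · have : k = l.length - 1 := by omega
    subst this; rfl

theorem pv_one_mem_half {x : Int} (hx : 1 ≤ x) : (1 : Int) ∈ pvHalf x :=
  pv_mem_half.mpr ⟨⟨le_refl 1, pv_one_le_sqrt hx⟩, one_dvd x⟩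

theorem pv_half_ne_nil {x : Int} (hx : 1 ≤ x) : pvHalf x ≠ [] :=
  List.ne_nil_of_mem (pv_one_mem_half hx)

theorem pv_alt_eq {x : Int} (hx : 1 ≤ x) :
    get_max_factor_alt x =
      ((pvHalf x).getLast (pv_half_ne_nil hx),
       x / (pvHalf x).getLast (pv_half_ne_nil hx)) := by
  have hne := pv_half_ne_nil hx
  have hd : PySem.List.pyGet? (pvHalf x) (-1) = some ((pvHalf x).getLast hne) := by
    rw [PySem.List.pyGet?_neg_one, List.getLast?_eq_some_getLast hne]
  have hdpos : (1:Int) ≤ (pvHalf x).getLast hne :=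
    (pv_mem_half.mp (List.getLast_mem hne)).1.1
  show ((PySem.List.pyGet? (pvHalf x) (-1)).getD 0,
        PySem.Int.floordiv x ((PySem.List.pyGet? (pvHalf x) (-1)).getD 0)) = _
  rw [hd]
  simp only [Option.getD_some]
  rw [PySem.Int.floordiv_eq_ediv_of_pos (by omega)]

theorem pv_main {x : Int} (hx : 1 ≤ x) :
    get_max_factor x =
      ((pvHalf x).getLast (pv_half_ne_nil hx),
       x / (pvHalf x).getLast (pv_half_ne_nil hx)) := by
  have hne := pv_half_ne_nil hx
  have hs' := pv_sorted_eq hx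
  unfold pvF pvSqrt at hs'
  simp only [get_max_factor]
  rw [hs']
  have hh1 : 1 ≤ (pvHalf x).length := List.length_pos_of_ne_nil hne
  have hd_mem : (pvHalf x).getLast hne ∈ pvHalf x := List.getLast_mem hne
  have hdget : (pvHalf x)[(pvHalf x).length - 1]'(by omega) = (pvHalf x).getLast hne :=
    (List.getLast_eq_getElem hne).symm
  by_cases hsq : x = pvSqrt x * pvSqrt x
  · -- perfect square: odd number of divisors, middle = d = sqrt x
    have hs1 : 1 ≤ pvSqrt x := pv_one_le_sqrt hx
    have hsmem : pvSqrt x ∈ pvHalf x :=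
      pv_mem_half.mpr ⟨⟨hs1, le_refl _⟩, ⟨pvSqrt x, hsq⟩⟩
    have hds : (pvHalf x).getLast hne = pvSqrt x :=
      le_antisymm (pv_mem_half.mp hd_mem).1.2 (pv_getLast_le (pv_half_pairwise x) hne _ hsmem)
    have hxdd : x / (pvHalf x).getLast hne = (pvHalf x).getLast hne := by
      rw [hds]
      have hsq' := hsq
      have hs1' := hs1
      generalize pvSqrt x = s at hsq' hs1' ⊢
      rw [hsq']
      exact Int.mul_ediv_cancel_left _ (by omega)
    have hnd : (pvHalf x).Nodup := (pv_half_pairwise x).imp ne_of_lt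
    have hdecomp : (pvHalf x).dropLast ++ [(pvHalf x).getLast hne] = pvHalf x :=
      List.dropLast_append_getLast hne
    have hmemdrop : ∀ i ∈ (pvHalf x).dropLast, i ∈ pvHalf x ∧ i ≠ (pvHalf x).getLast hne := by
      intro i hi
      refine ⟨by rw [← hdecomp]; exact List.mem_append_left _ hi, ?_⟩
      have hnd' := hnd
      rw [← hdecomp] at hnd'
      have hdis := (List.nodup_append.mp hnd').2.2
      intro heq
      exact hdis i hi _ (by simp) heq
    have hfilt : (pvHalf x).filter (fun i => !(x / i == i)) = (pvHalf x).dropLast := by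
      conv_lhs => rw [← hdecomp]
      rw [List.filter_append]
      have h1 : List.filter (fun i => !(x / i == i)) [(pvHalf x).getLast hne] = [] := by
        simp [hxdd]
      rw [h1, List.append_nil]
      apply List.filter_eq_self.mpr
      intro i hi
      obtain ⟨hmem, hneq⟩ := hmemdrop i hi
      simp only [Bool.not_eq_eq_eq_not, Bool.not_true, beq_eq_false_iff_ne, ne_eq]
      intro heq
      exact hneq ((pv_key3 hx hmem heq).1.trans hds.symm)
    have hlen : (pvFull x).length = (pvHalf x).length + ((pvHalf x).length - 1) := by
      simp [pvFull, pvComp, hfilt]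
    rw [hlen]
    have hmod : PySem.Int.mod (((pvHalf x).length + ((pvHalf x).length - 1) : Nat) : Int) 2 = 1 := by
      rw [PySem.Int.mod_eq_emod_of_pos (by norm_num)]
      omega
    have hdiv : PySem.Int.floordiv (((pvHalf x).length + ((pvHalf x).length - 1) : Nat) : Int) 2
        = (((pvHalf x).length - 1 : Nat) : Int) := by
      rw [PySem.Int.floordiv_eq_ediv_of_pos (by norm_num)]
      omega
    rw [if_neg (by rw [hmod]; simp)]
    rw [hdiv]
    have hidx : PySem.List.pyGet? (pvFull x) (((pvHalf x).length - 1 : Nat) : Int)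
        = some ((pvHalf x).getLast hne) := by
      rw [PySem.List.pyGet?_natCast]
      unfold pvFull
      rw [List.getElem?_append_left (by omega)]
      rw [List.getElem?_eq_getElem (by omega)]
      rw [hdget]
    rw [hidx]
    simp only [Option.getD_some]
    rw [hxdd]
  · -- not a square: even number of divisors
    have hfilt : (pvHalf x).filter (fun i => !(x / i == i)) = pvHalf x := by
      apply List.filter_eq_self.mpr
      intro i hi
      simp only [Bool.not_eq_eq_eq_not, Bool.not_true, beq_eq_false_iff_ne, ne_eq]
      intro heq
      exact hsq (pv_key3 hx hi heq).2
    have hcomp : pvComp x = (pvHalf x).map (fun i => x / i) := by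
      unfold pvComp; rw [hfilt]
    have hlen : (pvFull x).length = (pvHalf x).length + (pvHalf x).length := by
      simp [pvFull, hcomp]
    rw [hlen]
    have hmod : PySem.Int.mod (((pvHalf x).length + (pvHalf x).length : Nat) : Int) 2 = 0 := by
      rw [PySem.Int.mod_eq_emod_of_pos (by norm_num)]
      push_cast; omega
    have hdiv : PySem.Int.floordiv (((pvHalf x).length + (pvHalf x).length : Nat) : Int) 2
        = (((pvHalf x).length : Nat) : Int) := by
      rw [PySem.Int.floordiv_eq_ediv_of_pos (by norm_num)]
      push_cast; omega
    rw [if_pos (by rw [hmod]; rfl)]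
    rw [hdiv]
    have hidx1 : PySem.List.pyGet? (pvFull x) ((((pvHalf x).length : Nat) : Int) - 1)
        = some ((pvHalf x).getLast hne) := by
      have hcast : (((pvHalf x).length : Nat) : Int) - 1 = (((pvHalf x).length - 1 : Nat) : Int) := by
        omega
      rw [hcast, PySem.List.pyGet?_natCast]
      unfold pvFull
      rw [List.getElem?_append_left (by omega)]
      rw [List.getElem?_eq_getElem (by omega)]
      rw [hdget]
    have hidx2 : PySem.List.pyGet? (pvFull x) (((pvHalf x).length : Nat) : Int)
        = some (x / (pvHalf x).getLast hne) := by
      rw [PySem.List.pyGet?_natCast]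
      unfold pvFull
      rw [List.getElem?_append_right (by omega)]
      rw [hcomp, Nat.sub_self]
      rw [List.getElem?_reverse (by simpa using hh1)]
      rw [List.getElem?_eq_getElem (by simp; omega)]
      congr 1
      rw [List.getElem_map]
      congr 1
      simp only [List.length_map, Nat.sub_zero]
      exact hdget
    rw [hidx1, hidx2]
    rfl

-- ===== VERDICT (by name: the statement is the Claim_ definition above) =====
theorem get_max_factor_spec : Claim_equal_get_max_factor := by
  intro x _ hpre
  unfold Spec_get_max_factor
  rw [pv_main hpre, pv_alt_eq hpre]
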